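-- pv_equiv track=rewrite | github.com/nicloh-afk/tcx1002 | mocktest7.py | zigzag_cols_right_to_left
-- ===== SOURCE A (Python) =====
-- def sqrt(s):
--   l = len(s)
--   x = 1
--   while (x*x) < l:
--     x +=1
--   return x
--
-- def zigzag_cols_right_to_left(s):
--   if s:
--     n = sqrt(s)
--     total_s = n*n
--     res_s = [c for c in s.ljust(total_s,'?')]
--     res = []
--     for j in range(n):
--       h = [res_s[i] for i in range(j,total_s,n)]
--       res.append(h[::-1])
--     return res
--   else:
--     return [[]]
-- ===== SOURCE B (Python) =====
-- def ceil_sqrt(l):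
--     # smallest x >= 1 with x*x >= l, by binary search
--     lo, hi = 0, l
--     while lo < hi:
--         mid = (lo + hi) // 2
--         if mid * mid >= l:
--             hi = mid
--         else:
--             lo = mid + 1
--     return max(lo, 1)
--
-- def zigzag_cols_right_to_left(s):
--     if not s:
--         return [[]]
--     l = len(s)
--     n = ceil_sqrt(l)
--     padded = s + '?' * (n * n - l)
--     rows = [padded[r * n:(r + 1) * n] for r in range(n)]
--     return [list(col) for col in zip(*reversed(rows))]
-- ===== Notes on version B (the rewrite author's own statement) =====
-- stated objective: idiomatic
-- what changed: B replaces the strided index reads (range(j, n*n, n) with per-column reverse) by the idiomatic chunk-into-rows then zip(*reversed(rows)) transpose, and computes the ceil-sqrt by binary search instead of a linear counting loop.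
import Mathlib
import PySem

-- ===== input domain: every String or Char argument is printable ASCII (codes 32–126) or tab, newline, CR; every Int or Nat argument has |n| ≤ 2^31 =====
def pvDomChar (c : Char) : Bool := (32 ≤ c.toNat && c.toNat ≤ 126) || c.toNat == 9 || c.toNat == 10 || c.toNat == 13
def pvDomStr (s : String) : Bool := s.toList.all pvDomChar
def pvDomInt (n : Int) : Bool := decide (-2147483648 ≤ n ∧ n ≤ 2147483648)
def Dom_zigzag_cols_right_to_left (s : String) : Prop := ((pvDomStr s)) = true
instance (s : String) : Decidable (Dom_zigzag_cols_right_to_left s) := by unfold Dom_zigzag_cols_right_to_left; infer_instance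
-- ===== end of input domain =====

-- B: idiomatic chunk-rows + zip(*reversed(rows)) transpose and a binary-search ceil-sqrt, instead of strided index reads; same values.


-- ===== PORT A =====
-- helper 'sqrt(s)': x = 1; while x*x < l: x += 1
def sqrtAGo (l x : Nat) : Nat :=
  if x * x < l then sqrtAGo l (x + 1) else x
termination_by l - x
decreasing_by
  have hx : x ≤ x * x := by
    rcases Nat.eq_zero_or_pos x with h0 | h0
    · simp [h0]
    · exact Nat.le_mul_of_pos_left x h0
  omega

def sqrtA (l : Nat) : Nat := sqrtAGo l 1

def zigzag_cols_right_to_left (s : String) : List (List String) :=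
  if s ≠ "" then
    let n : Nat := sqrtA s.length
    let total : Nat := n * n
    -- s.ljust(total,'?') ported by hand: pad on the right with '?' up to total (exact: Nat subtraction clamps like ljust)
    let res_s : List String := (s.toList ++ List.replicate (total - s.length) '?').map (fun c => String.ofList [c])
    (PySem.List.pyRange 0 (n : Int) 1).map (fun j =>
      -- h[::-1] is List.reverse (PySem.List.slice?_none_none_neg_one)
      ((PySem.List.pyRange j (total : Int) (n : Int)).map (fun i => PySem.List.pyGetD res_s i "")).reverse)
  else [[]]

-- ===== PORT B =====
-- helper 'ceil_sqrt(l)': binary search for the smallest x with x*x >= l, then max(lo, 1)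
def ceilSqrtGo (l lo hi : Nat) : Nat :=
  if lo < hi then
    let mid := (lo + hi) / 2
    if l ≤ mid * mid then ceilSqrtGo l lo mid else ceilSqrtGo l (mid + 1) hi
  else lo
termination_by hi - lo
decreasing_by all_goals omega

def ceilSqrtB (l : Nat) : Nat := max (ceilSqrtGo l 0 l) 1

-- zip(*rows): yield the tuple of heads while every row is nonempty
def zipStar (rows : List (List Char)) : List (List Char) :=
  if h : rows ≠ [] ∧ rows.all (fun r => !r.isEmpty) then
    rows.map (fun r => r.headD '?') :: zipStar (rows.map List.tail)
  else []
termination_by (rows.headD []).length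
decreasing_by
  obtain ⟨hne, hall⟩ := h
  cases rows with
  | nil => exact absurd rfl hne
  | cons a t =>
    simp only [List.all_cons, Bool.and_eq_true, Bool.not_eq_true', List.isEmpty_eq_false_iff] at hall
    simp [List.length_tail]
    have : 0 < a.length := List.length_pos_iff.mpr hall.1
    omega

def zigzag_cols_right_to_left_alt (s : String) : List (List String) :=
  if s = "" then [[]]
  else
    let l := s.length
    let n := ceilSqrtB l
    let padded : List Char := s.toList ++ List.replicate (n * n - l) '?'
    let rows : List (List Char) :=
      (List.range n).map (fun r => PySem.List.slice padded (some ((r * n : Nat) : Int)) (some (((r + 1) * n : Nat) : Int)))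
    (zipStar rows.reverse).map (fun col => col.map (fun c => String.ofList [c]))

-- ===== PRECONDITION & SPEC =====
def Spec_zigzag_cols_right_to_left (s : String) (out : List (List String)) : Prop := out = zigzag_cols_right_to_left_alt s
instance (s : String) (out : List (List String)) : Decidable (Spec_zigzag_cols_right_to_left s out) := by unfold Spec_zigzag_cols_right_to_left; infer_instance

-- ===== CLAIM (what is proved, stated in full; the proofs are below) =====
def Claim_equal_zigzag_cols_right_to_left : Prop := ∀ (s : String), Dom_zigzag_cols_right_to_left s → Spec_zigzag_cols_right_to_left s (zigzag_cols_right_to_left s)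

-- ===== LEMMAS AND PROOFS =====

-- smallest-solution characterisation of A's counting loop
theorem sqrtAGo_sq_ge (l x : Nat) : l ≤ sqrtAGo l x * sqrtAGo l x := by
  fun_induction sqrtAGo l x with
  | case1 x h ih => exact ih
  | case2 x h => omega

theorem sqrtAGo_le (l x : Nat) : x ≤ sqrtAGo l x := by
  fun_induction sqrtAGo l x with
  | case1 x h ih => omega
  | case2 x h => omega

theorem sqrtAGo_min (l x : Nat) : ∀ y, x ≤ y → y < sqrtAGo l x → y * y < l := by
  fun_induction sqrtAGo l x with
  | case1 x h ih =>
    intro y h1 h2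
    rcases Nat.eq_or_lt_of_le h1 with rfl | h1
    · exact h
    · exact ih y h1 h2
  | case2 x h => intro y h1 h2; omega

-- invariant of B's binary search
theorem ceilSqrtGo_spec (l lo hi : Nat) (hle : lo ≤ hi) (hhi : l ≤ hi * hi)
    (hlo : ∀ y, y < lo → y * y < l) :
    l ≤ ceilSqrtGo l lo hi * ceilSqrtGo l lo hi ∧
      ∀ y, y < ceilSqrtGo l lo hi → y * y < l := by
  fun_induction ceilSqrtGo l lo hi with
  | case1 lo hi h mid hm ih =>
    exact ih (by omega) hm hlo
  | case2 lo hi h mid hm ih =>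
    refine ih (by omega) hhi ?_
    intro y hy
    rcases Nat.lt_or_ge y lo with h1 | h1
    · exact hlo y h1
    · have : y * y ≤ mid * mid := Nat.mul_le_mul (by omega) (by omega)
      omega
  | case3 lo hi h =>
    have : lo = hi := by omega
    subst this
    exact ⟨hhi, hlo⟩

-- the two square-root helpers agree on positive lengths
theorem sqrt_eq (l : Nat) (hl : 1 ≤ l) : ceilSqrtB l = sqrtA l := by
  have ha1 : l ≤ sqrtA l * sqrtA l := sqrtAGo_sq_ge l 1
  have ha2 : 1 ≤ sqrtA l := sqrtAGo_le l 1
  have ha3 : ∀ y, 1 ≤ y → y < sqrtA l → y * y < l := sqrtAGo_min l 1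
  obtain ⟨hb1, hb2⟩ := ceilSqrtGo_spec l 0 l (by omega) (Nat.le_mul_of_pos_left l hl) (by omega)
  have hr1 : 1 ≤ ceilSqrtGo l 0 l := by
    by_contra h
    have h0 : ceilSqrtGo l 0 l = 0 := by omega
    rw [h0] at hb1; omega
  have heq : ceilSqrtGo l 0 l = sqrtA l := by
    rcases Nat.lt_trichotomy (ceilSqrtGo l 0 l) (sqrtA l) with h | h | h
    · have := ha3 _ hr1 h; omega
    · exact h
    · have := hb2 _ h; omega
  unfold ceilSqrtB
  omega

-- zipStar is a transpose when all rows have the same length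
theorem zipStar_transpose (m : Nat) : ∀ (rs : List (List Char)), rs ≠ [] →
    (∀ r ∈ rs, r.length = m) →
    zipStar rs = (List.range m).map (fun j => rs.map (fun r => r.getD j '?')) := by
  induction m with
  | zero =>
    intro rs hne hlen
    rw [zipStar]
    rw [dif_neg]
    · simp
    · rintro ⟨-, hall⟩
      cases rs with
      | nil => exact hne rfl
      | cons a t =>
        simp only [List.all_cons, Bool.and_eq_true, Bool.not_eq_true', List.isEmpty_eq_false_iff] at hall
        exact hall.1 (List.eq_nil_of_length_eq_zero (hlen a (by simp)))
  | succ m ih =>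
    intro rs hne hlen
    rw [zipStar]
    rw [dif_pos]
    · have htail : ∀ r ∈ rs.map List.tail, r.length = m := by
        intro r hr
        simp only [List.mem_map] at hr
        obtain ⟨a, ha, rfl⟩ := hr
        have := hlen a ha
        simp [List.length_tail, this]
      rw [ih (rs.map List.tail) (by simpa using hne) htail]
      rw [List.range_succ_eq_map]
      simp only [List.map_cons, List.map_map]
      refine congrArg₂ List.cons ?_ ?_
      · apply List.map_congr_left
        intro a ha
        have := hlen a ha
        cases a with
        | nil => simp at this
        | cons c cs => simp
      · apply List.map_congr_left
        intro j hj
        apply List.map_congr_left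
        intro a ha
        have := hlen a ha
        cases a with
        | nil => simp at this
        | cons c cs => simp [Function.comp, List.getD]
    · constructor
      · exact hne
      · simp only [List.all_eq_true, Bool.not_eq_true', List.isEmpty_eq_false_iff]
        intro r hr
        have := hlen r hr
        intro h0
        rw [h0] at this
        simp at this

-- A's strided range(j, n*n, n) is an affine image of range n
theorem pyRange_stride (n j : Nat) (hn : 0 < n) (hj : j < n) :
    PySem.List.pyRange (j : Int) ((n * n : Nat) : Int) (n : Int) =
      (List.range n).map (fun k => ((j + n * k : Nat) : Int)) := by
  rw [PySem.List.pyRange_of_pos _ _ (by exact_mod_cast hn)]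
  have hcond : (j : Int) < ((n * n : Nat) : Int) := by push_cast; nlinarith
  rw [if_pos hcond]
  have h1 : (((n * n : Nat) : Int) - j + (n : Int) - 1) = ((n : Int) - 1 - j) + (n : Int) * (n : Int) := by
    push_cast; ring
  have h2 : (((n * n : Nat) : Int) - j + (n : Int) - 1) / (n : Int) = (n : Int) := by
    rw [h1, Int.add_mul_ediv_left _ _ (by exact_mod_cast hn.ne')]
    rw [Int.ediv_eq_zero_of_lt (by omega) (by omega)]
    simp
  rw [h2]
  simp only [Int.toNat_natCast]
  apply List.map_congr_left
  intro k hk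
  push_cast
  ring

theorem getD_map_singleton (xs : List Char) (i : Nat) (h : i < xs.length) :
    (xs.map (fun c => String.ofList [c])).getD i "" = String.ofList [xs.getD i '?'] := by
  rw [List.getD_eq_getElem _ _ (by simpa using h), List.getD_eq_getElem _ _ h, List.getElem_map]

theorem getD_take_drop (xs : List Char) (a m j : Nat) (hj : j < m) (hm : a + m ≤ xs.length) :
    ((xs.drop a).take m).getD j '?' = xs.getD (a + j) '?' := by
  have h1 : j < ((xs.drop a).take m).length := by
    simp only [List.length_take, List.length_drop]; omega
  rw [List.getD_eq_getElem _ _ h1, List.getD_eq_getElem _ _ (by omega)]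
  rw [List.getElem_take, List.getElem_drop]



-- both ports build the same column matrix over the padded character list
theorem cols_eq (n : Nat) (hn : 1 ≤ n) (padded : List Char) (hp : padded.length = n * n) :
    (PySem.List.pyRange 0 (n : Int) 1).map (fun j =>
        ((PySem.List.pyRange j ((n * n : Nat) : Int) (n : Int)).map
          (fun i => PySem.List.pyGetD (padded.map (fun c => String.ofList [c])) i "")).reverse)
    = (zipStar (((List.range n).map (fun r =>
          PySem.List.slice padded (some ((r * n : Nat) : Int)) (some (((r + 1) * n : Nat) : Int)))).reverse)).map
        (fun col => col.map (fun c => String.ofList [c])) := by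
  have hL : (PySem.List.pyRange 0 (n : Int) 1).map (fun j =>
        ((PySem.List.pyRange j ((n * n : Nat) : Int) (n : Int)).map
          (fun i => PySem.List.pyGetD (padded.map (fun c => String.ofList [c])) i "")).reverse)
      = (List.range n).map (fun j =>
          ((List.range n).map (fun k => String.ofList [padded.getD (k * n + j) '?'])).reverse) := by
    rw [PySem.List.pyRange_one]
    have hτ : ((n : Int) - 0).toNat = n := by simp
    rw [hτ, List.map_map]
    apply List.map_congr_left
    intro j hj
    have hjn : j < n := List.mem_range.mp hj
    simp only [Function.comp, zero_add]
    rw [pyRange_stride n j (by omega) hjn, List.map_map]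
    congr 1
    apply List.map_congr_left
    intro k hk
    have hkn : k < n := List.mem_range.mp hk
    simp only [Function.comp]
    rw [PySem.List.pyGetD_natCast]
    have hb : j + n * k < padded.length := by rw [hp]; nlinarith
    rw [getD_map_singleton padded _ hb]
    have : j + n * k = k * n + j := by ring
    rw [this]
  have hR : (zipStar (((List.range n).map (fun r =>
          PySem.List.slice padded (some ((r * n : Nat) : Int)) (some (((r + 1) * n : Nat) : Int)))).reverse)).map
        (fun col => col.map (fun c => String.ofList [c]))
      = (List.range n).map (fun j =>
          ((List.range n).map (fun k => String.ofList [padded.getD (k * n + j) '?'])).reverse) := by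
    have hrow : ∀ r : Nat, PySem.List.slice padded (some ((r * n : Nat) : Int)) (some (((r + 1) * n : Nat) : Int))
        = (padded.drop (r * n)).take n := by
      intro r
      rw [PySem.List.slice_natCast]
      congr 1
      have : (r + 1) * n = r * n + n := by ring
      omega
    simp only [hrow]
    have hlen : ∀ row ∈ ((List.range n).map (fun r => (padded.drop (r * n)).take n)).reverse,
        row.length = n := by
      intro row hrow'
      rw [List.mem_reverse, List.mem_map] at hrow'
      obtain ⟨r, hr, rfl⟩ := hrow'
      have hrn : r < n := List.mem_range.mp hr
      have hmul : (r + 1) * n ≤ n * n := Nat.mul_le_mul_right n (by omega)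
      have : (r + 1) * n = r * n + n := by ring
      simp only [List.length_take, List.length_drop, hp]
      omega
    have hne : ((List.range n).map (fun r => (padded.drop (r * n)).take n)).reverse ≠ [] := by
      simp only [ne_eq, List.reverse_eq_nil_iff, List.map_eq_nil_iff, List.range_eq_nil]
      omega
    rw [zipStar_transpose n _ hne hlen, List.map_map]
    apply List.map_congr_left
    intro j hj
    have hjn : j < n := List.mem_range.mp hj
    simp only [Function.comp, List.map_reverse, List.map_map]
    congr 1
    apply List.map_congr_left
    intro r hr
    have hrn : r < n := List.mem_range.mp hr
    simp only [Function.comp]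
    have hmul : (r + 1) * n ≤ n * n := Nat.mul_le_mul_right n (by omega)
    have hrw : (r + 1) * n = r * n + n := by ring
    rw [getD_take_drop padded (r * n) n j hjn (by omega)]
  rw [hL, hR]

-- ===== VERDICT (by name: the statement is the Claim_ definition above) =====
theorem zigzag_cols_right_to_left_spec : Claim_equal_zigzag_cols_right_to_left := by
  intro s _
  unfold Spec_zigzag_cols_right_to_left
  by_cases hs : s = ""
  · simp [zigzag_cols_right_to_left, zigzag_cols_right_to_left_alt, hs]
  · have hl : 1 ≤ s.length := by
      rcases Nat.eq_zero_or_pos s.length with h0 | h0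
      · exact absurd (String.length_eq_zero_iff.mp h0) hs
      · exact h0
    unfold zigzag_cols_right_to_left zigzag_cols_right_to_left_alt
    rw [if_pos hs, if_neg hs]
    dsimp only
    rw [sqrt_eq s.length hl]
    have hn : 1 ≤ sqrtA s.length := sqrtAGo_le s.length 1
    have hsq : s.length ≤ sqrtA s.length * sqrtA s.length := sqrtAGo_sq_ge s.length 1
    exact cols_eq (sqrtA s.length) hn (s.toList ++ List.replicate (sqrtA s.length * sqrtA s.length - s.length) '?')
      (by simp only [List.length_append, List.length_replicate, String.length_toList]; omega)
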